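-- pv_equiv track=rewrite | github.com/JahdyM/life-dashboard | dashboard/tabs/calendar_tab.py | _build_day_hour_board
-- ===== SOURCE A (Python) =====
-- def _build_day_hour_board(day_tasks):
--     index = {f"{hour:02d}": [] for hour in range(0, 24)}
--     for item in day_tasks:
--         item_time = item.get("scheduled_time")
--         if not item_time:
--             continue
--         hour_key = str(item_time)[:2]
--         index.setdefault(hour_key, []).append(f"{item_time} • {item.get('title')}")
--     rows = []
--     for hour in range(0, 24):
--         hour_key = f"{hour:02d}"
--         rows.append((f"{hour_key}:00", " | ".join(index.get(hour_key, []))))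
--     return rows
-- ===== SOURCE B (Python) =====
-- def _build_day_hour_board(day_tasks):
--     rows = []
--     for hour in range(24):
--         hour_key = f"{hour:02d}"
--         cell = " | ".join(
--             f"{t} \u2022 {item.get('title')}"
--             for item in day_tasks
--             if (t := item.get("scheduled_time")) and str(t)[:2] == hour_key
--         )
--         rows.append((f"{hour_key}:00", cell))
--     return rows
-- ===== Notes on version B (the rewrite author's own statement) =====
-- stated objective: simpler
-- what changed: Drops the intermediate hour-indexed dict of buckets entirely: B builds each of the 24 rows by scanning day_tasks directly with a single generator expression (truthiness guard and str(t)[:2]==hour_key filter inline), instead of A's build-index-then-read two-phase approach.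
import Mathlib
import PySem

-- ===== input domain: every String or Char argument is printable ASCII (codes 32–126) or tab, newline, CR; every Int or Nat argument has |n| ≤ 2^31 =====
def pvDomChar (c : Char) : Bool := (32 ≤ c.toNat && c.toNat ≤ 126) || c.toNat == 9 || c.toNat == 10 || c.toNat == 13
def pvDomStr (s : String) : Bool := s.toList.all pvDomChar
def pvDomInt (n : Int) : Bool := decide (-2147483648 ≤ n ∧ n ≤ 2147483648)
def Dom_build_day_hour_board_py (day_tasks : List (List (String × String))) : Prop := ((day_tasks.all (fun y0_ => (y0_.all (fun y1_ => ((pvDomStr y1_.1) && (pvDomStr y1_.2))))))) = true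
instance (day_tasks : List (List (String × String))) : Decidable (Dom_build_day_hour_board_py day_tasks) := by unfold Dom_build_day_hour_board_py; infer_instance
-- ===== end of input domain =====

-- B drops A's intermediate hour→bucket dict and builds each of the 24 rows by scanning
-- day_tasks directly (objective: simpler).

-- ===== PORT A =====
-- f"{hour:02d}" = str(hour) zero-padded to width 2 (exact for the 0 ≤ hour < 24 used here,
-- where the Python format equals str(hour).zfill(2))
def pvHourKey (h : Int) : String := PySem.Str.zfill (PySem.Int.toStr h) 2

def build_day_hour_board_py (day_tasks : List (List (String × String))) : List (String × String) :=
  -- index = {f"{hour:02d}": [] for hour in range(0, 24)}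
  let index0 : PySem.Dict String (List String) :=
    (PySem.List.pyRange 0 24 1).foldl
      (fun d h => d.insert (pvHourKey h) ([] : List String)) PySem.Dict.empty
  -- for item in day_tasks: guard truthiness, then
  -- index.setdefault(hour_key, []).append(msg)  = d[hour_key] = d.get(hour_key, []) + [msg]
  -- (in-place append keeps the key's position; a fresh key goes to the end) = Dict.modify
  let index : PySem.Dict String (List String) :=
    day_tasks.foldl
      (fun d item =>
        match (PySem.Dict.mk item).get? "scheduled_time" with
        | none => d            -- item.get returns None: falsy, continue
        | some t =>
          if t == "" then d    -- empty string: falsy, continue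
          else
            -- hour_key = str(item_time)[:2]  (item_time is already a str)
            d.modify (String.ofList (PySem.List.slice t.toList none (some 2))) []
              (· ++ [t ++ " • " ++ (((PySem.Dict.mk item).get? "title").getD "None")]))
      index0
  -- rows loop over range(0, 24)
  (PySem.List.pyRange 0 24 1).foldl
    (fun rows h =>
      let hk := pvHourKey h
      rows ++ [(hk ++ ":00", PySem.Str.join " | " (index.getD hk []))]) []

-- ===== PORT B =====
def build_day_hour_board_py_alt (day_tasks : List (List (String × String))) : List (String × String) :=
  (PySem.List.pyRange 0 24 1).map (fun h =>
    let hk := pvHourKey h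
    (hk ++ ":00",
     PySem.Str.join " | "
       (day_tasks.filterMap (fun item =>
          match (PySem.Dict.mk item).get? "scheduled_time" with
          | none => none
          | some t =>
            if !(t == "") && (String.ofList (PySem.List.slice t.toList none (some 2)) == hk)
            then some (t ++ " • " ++ (((PySem.Dict.mk item).get? "title").getD "None"))
            else none))))

-- ===== PRECONDITION & SPEC =====
def Spec_build_day_hour_board_py (day_tasks : List (List (String × String))) (out : List (String × String)) : Prop := out = build_day_hour_board_py_alt day_tasks
instance (day_tasks : List (List (String × String))) (out : List (String × String)) : Decidable (Spec_build_day_hour_board_py day_tasks out) := by unfold Spec_build_day_hour_board_py; infer_instance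

-- ===== CLAIM (what is proved, stated in full; the proofs are below) =====
def Claim_equal_build_day_hour_board_py : Prop := ∀ (day_tasks : List (List (String × String))), Dom_build_day_hour_board_py day_tasks → Spec_build_day_hour_board_py day_tasks (build_day_hour_board_py day_tasks)

-- ===== LEMMAS AND PROOFS =====

-- B's per-hour scan, as a standalone function (definitionally the filterMap inside the alt port)
def pvMsgs (day_tasks : List (List (String × String))) (hk : String) : List String :=
  day_tasks.filterMap (fun item =>
    match (PySem.Dict.mk item).get? "scheduled_time" with
    | none => none
    | some t =>
      if !(t == "") && (String.ofList (PySem.List.slice t.toList none (some 2)) == hk)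
      then some (t ++ " • " ++ (((PySem.Dict.mk item).get? "title").getD "None"))
      else none)

-- the A-side fold step
def pvStepA (d : PySem.Dict String (List String)) (item : List (String × String)) :
    PySem.Dict String (List String) :=
  match (PySem.Dict.mk item).get? "scheduled_time" with
  | none => d
  | some t =>
    if t == "" then d
    else
      d.modify (String.ofList (PySem.List.slice t.toList none (some 2))) []
        (· ++ [t ++ " • " ++ (((PySem.Dict.mk item).get? "title").getD "None")])

-- bucket invariant: after A's indexing fold, each key holds its old value ++ B's matching messages
lemma pvFold_getD (day_tasks : List (List (String × String)))
    (d : PySem.Dict String (List String)) (hk : String) :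
    (day_tasks.foldl pvStepA d).getD hk [] = d.getD hk [] ++ pvMsgs day_tasks hk := by
  induction day_tasks generalizing d with
  | nil => simp [pvMsgs]
  | cons item rest ih =>
    simp only [List.foldl_cons, pvMsgs, List.filterMap_cons]
    cases hg : (PySem.Dict.mk item).get? "scheduled_time" with
    | none =>
      simp only [pvStepA, hg]
      simpa [pvMsgs] using ih d
    | some t =>
      by_cases ht : t = ""
      · simp only [pvStepA, hg, ht]
        simpa [pvMsgs] using ih d
      · by_cases hkey : String.ofList (PySem.List.slice t.toList none (some 2)) = hk
        · simp only [pvStepA, hg]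
          rw [if_neg (by simp [ht]), hkey, ih, PySem.Dict.getD_modify, if_pos rfl]
          simp [pvMsgs, ht]
        · simp only [pvStepA, hg]
          rw [if_neg (by simp [ht]), ih, PySem.Dict.getD_modify,
            if_neg (fun h => hkey h.symm)]
          simp [pvMsgs, ht, hkey]

-- the comprehension dict {hk(h): [] …} gives [] on every key
lemma pvIndex0_getD (hs : List Int) (d : PySem.Dict String (List String))
    (h0 : ∀ k, d.getD k [] = []) (hk : String) :
    (hs.foldl (fun d h => d.insert (pvHourKey h) ([] : List String)) d).getD hk [] = [] := by
  induction hs generalizing d with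
  | nil => exact h0 hk
  | cons h rest ih =>
    simp only [List.foldl_cons]
    exact ih _ (fun k => by rw [PySem.Dict.getD_insert]; split <;> simp [h0])

-- ===== VERDICT (by name: the statement is the Claim_ definition above) =====
theorem build_day_hour_board_py_spec : Claim_equal_build_day_hour_board_py := by
  intro day_tasks _
  unfold Spec_build_day_hour_board_py build_day_hour_board_py build_day_hour_board_py_alt
  rw [show (fun (d : PySem.Dict String (List String)) (item : List (String × String)) =>
        match (PySem.Dict.mk item).get? "scheduled_time" with
        | none => d
        | some t =>
          if t == "" then d
          else
            d.modify (String.ofList (PySem.List.slice t.toList none (some 2))) []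
              (· ++ [t ++ " • " ++ (((PySem.Dict.mk item).get? "title").getD "None")]))
      = pvStepA from rfl]
  rw [PySem.List.foldl_append_singleton_eq_map]
  refine List.map_congr_left (fun h _ => ?_)
  rw [pvFold_getD, pvIndex0_getD _ _ (fun k => PySem.Dict.getD_empty ..)]
  rfl
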